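-- pv_equiv track=rewrite | github.com/YevenLourance/Poker_game_sorter | test.py | kind
-- ===== SOURCE A (Python) =====
-- from collections import defaultdict
--
-- def kind(values): # return the counts of different values card and a list of ranked values.
--     unique = defaultdict(int) # dictionary with dafault values 0
--     for i in values:
--         unique[i] = unique[i]+1
--
--     ranked_value = [] # a list of values orderd by the counts. If counts tie then orderd by value.
--
--     counts = sorted(list(set(unique.values())),reverse=True) # the counts of values in descending order.
--
--     keys = sorted(list(unique.keys()),reverse=True)
--
--     for n in counts:
--         for i in keys:
--             if unique[i]==n:
--                 ranked_value.append(i) # firstly insert the most frequent value, then insert the higher value.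
--
--     return list(unique.values()),ranked_value
-- ===== SOURCE B (Python) =====
-- from collections import Counter, defaultdict
--
-- def kind(values):
--     unique = Counter(values)
--     table = defaultdict(list)  # bucket the keys by their count
--     for k in sorted(unique, reverse=True):
--         table[unique[k]].append(k)
--     ranked_value = [v for c in sorted(table, reverse=True) for v in table[c]]
--     return list(unique.values()), ranked_value
-- ===== Notes on version B (the rewrite author's own statement) =====
-- stated objective: alternative
-- what changed: A rescans the full descending key list once per distinct count; B makes one grouping pass that buckets the descending keys into a count-keyed table and concatenates the buckets in descending count order.
import Mathlib
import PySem

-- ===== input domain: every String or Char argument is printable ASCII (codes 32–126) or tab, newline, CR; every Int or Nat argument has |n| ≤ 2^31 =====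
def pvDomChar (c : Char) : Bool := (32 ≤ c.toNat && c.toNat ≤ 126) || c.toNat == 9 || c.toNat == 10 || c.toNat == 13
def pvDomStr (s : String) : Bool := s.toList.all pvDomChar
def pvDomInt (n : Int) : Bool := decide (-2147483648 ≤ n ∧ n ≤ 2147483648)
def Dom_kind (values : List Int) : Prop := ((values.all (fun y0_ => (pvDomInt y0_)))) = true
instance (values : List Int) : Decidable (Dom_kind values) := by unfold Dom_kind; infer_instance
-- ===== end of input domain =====

-- B replaces A's rescan of all keys once per distinct count by a single grouping pass
-- into count-keyed buckets (objective: alternative decomposition, similar cost).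

-- ===== PORT A =====
def kind (values : List Int) : List Int × List Int :=
  let unique := values.foldl (fun d i => d.insert i (d.getD i 0 + 1))
    (PySem.Dict.empty : PySem.Dict Int Int)
  let counts := PySem.List.sorted (PySem.Set.ofList unique.values) (fun x => x) true
  let keys := PySem.List.sorted unique.keys (fun x => x) true
  let ranked := counts.foldl (fun acc n =>
    keys.foldl (fun acc i => if unique.getD i 0 == n then acc ++ [i] else acc) acc) []
  (unique.values, ranked)

-- ===== PORT B =====
def kind_alt (values : List Int) : List Int × List Int :=
  let unique := PySem.Dict.counter values
  let table := (PySem.List.sorted unique.keys (fun k => k) true).foldl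
    (fun d k => d.modify (unique.getD k 0) [] (fun l => l ++ [k]))
    (PySem.Dict.empty : PySem.Dict Int (List Int))
  let ranked := (PySem.List.sorted table.keys (fun c => c) true).flatMap
    (fun c => table.getD c [])
  (unique.values, ranked)

-- ===== PRECONDITION & SPEC =====
def Spec_kind (values : List Int) (out : List Int × List Int) : Prop := out = kind_alt values
instance (values : List Int) (out : List Int × List Int) : Decidable (Spec_kind values out) := by unfold Spec_kind; infer_instance

-- ===== CLAIM (what is proved, stated in full; the proofs are below) =====
def Claim_equal_kind : Prop := ∀ (values : List Int), Dom_kind values → Spec_kind values (kind values)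

-- ===== LEMMAS AND PROOFS =====

-- A's counting loop is definitionally Counter(values)
theorem kind_count_eq (values : List Int) :
    values.foldl (fun d i => d.insert i (d.getD i 0 + 1))
      (PySem.Dict.empty : PySem.Dict Int Int) = PySem.Dict.counter values := rfl

-- a bucket in B's grouping table holds exactly the keys with that count, in pass order
theorem bucket_getD (f : Int → Int) (l : List Int) (d : PySem.Dict Int (List Int)) (n : Int) :
    (l.foldl (fun d k => d.modify (f k) [] (fun t => t ++ [k])) d).getD n []
      = d.getD n [] ++ l.filter (fun k => f k == n) := by
  induction l generalizing d with
  | nil => simp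
  | cons a t ih =>
    simp only [List.foldl_cons, List.filter_cons, ih, PySem.Dict.getD_modify]
    by_cases h : n = f a
    · simp [h]
    · simp [h, beq_iff_eq]
      omega

-- descending sort without key of a duplicate-free list depends only on the element set
theorem sorted_rev_id_congr {xs ys : List Int} (h : xs.Perm ys) (hx : xs.Nodup) :
    PySem.List.sorted xs (fun x => x) true = PySem.List.sorted ys (fun x => x) true := by
  refine (PySem.List.sorted_rev_eq_of_perm_of_pairwise_gt ys
    (PySem.List.sorted xs (fun x => x) true) (fun x => x)
    (((PySem.List.sorted_perm xs _ _).trans h)) ?_).symm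
  have hle := PySem.List.sorted_pairwise_rev xs (fun x => x)
  have hnd : (PySem.List.sorted xs (fun x => x) true).Nodup :=
    (PySem.List.sorted_perm xs _ _).nodup_iff.mpr hx
  exact (hle.and hnd).imp (fun {a b} ⟨h1, h2⟩ => lt_of_le_of_ne h1 (Ne.symm h2))

-- Counter's values are its keys' counts
theorem values_counter (values : List Int) :
    (PySem.Dict.counter values).values
      = (PySem.Dict.counter values).keys.map (fun k => (PySem.Dict.counter values).getD k 0) := by
  simp only [PySem.Dict.values, PySem.Dict.keys, PySem.Dict.items_counter, List.map_map]
  exact (List.map_congr_left fun k _ => by simp [PySem.Dict.getD_counter]).symm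

-- ===== VERDICT (by name: the statement is the Claim_ definition above) =====
theorem kind_spec : Claim_equal_kind := by
  intro values _
  show kind values = kind_alt values
  simp only [kind, kind_alt, kind_count_eq]
  set c := PySem.Dict.counter values with hc
  set keys := PySem.List.sorted c.keys (fun x => x) true with hk
  set f : Int → Int := fun k => c.getD k 0 with hf
  set table := keys.foldl (fun d k => d.modify (f k) [] (fun t => t ++ [k]))
    (PySem.Dict.empty : PySem.Dict Int (List Int)) with ht
  refine Prod.ext rfl ?_
  -- A's inner loop is a filter, its outer loop a flatMap
  have h1 : ∀ (n : Int) (acc : List Int),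
      keys.foldl (fun acc i => if c.getD i 0 == n then acc ++ [i] else acc) acc
        = acc ++ keys.filter (fun i => c.getD i 0 == n) := fun n acc => by
    simpa using PySem.List.foldl_append_if (fun i => c.getD i 0 == n) id keys acc
  -- B's buckets are the same filters
  have hB : ∀ n : Int, table.getD n [] = keys.filter (fun i => c.getD i 0 == n) := fun n => by
    rw [ht, bucket_getD f keys PySem.Dict.empty n]
    simp [PySem.Dict.getD, PySem.Dict.get?, PySem.Dict.empty, hf]
  -- B's bucket keys are the set of counts, so its sorted key list is A's `counts`
  have hC : table.keys = PySem.Set.ofList (keys.map f) := by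
    rw [ht]
    simp only [PySem.Dict.modify]
    rw [PySem.Dict.keys_foldl_insert_key keys f (fun d k => d.getD (f k) [] ++ [k])]
    rfl
  have hD : PySem.List.sorted (PySem.Set.ofList c.values) (fun x => x) true
      = PySem.List.sorted table.keys (fun x => x) true := by
    rw [hC]
    apply sorted_rev_id_congr
    · rw [List.perm_ext_iff_of_nodup (PySem.Set.nodup_ofList _) (PySem.Set.nodup_ofList _)]
      intro a
      rw [PySem.Set.mem_ofList, PySem.Set.mem_ofList, hc, values_counter values, ← hc, ← hf]
      exact ((PySem.List.sorted_perm c.keys (fun x => x) true).map f).symm.mem_iff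
    · exact PySem.Set.nodup_ofList _
  simp only [← hc]
  simp only [h1, PySem.List.foldl_append_eq_flatMap, List.nil_append, hB, hD]
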